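-- pv_equiv track=rewrite | github.com/hightidAOaa/azdaz | wifa2.py | translate_preserve_5g
-- ===== SOURCE A (Python) =====
-- translation = {
--     '0':'f','1':'e','2':'d','3':'c','4':'b','5':'a',
--     '6':'9','7':'8','8':'7','9':'6',
--     'a':'5','b':'4','c':'3','d':'2','e':'1','f':'0'
-- }
--
-- def translate_preserve_5g(s):
--     parts = s.split("_5G")
--     translated = []
--     for i, part in enumerate(parts):
--         t = ''.join(translation.get(ch.lower(), ch) for ch in part)
--         translated.append(t)
--         if i != len(parts)-1:
--             translated.append("_5G")
--     return ''.join(translated)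
-- ===== SOURCE B (Python) =====
-- translation = {
--     '0':'f','1':'e','2':'d','3':'c','4':'b','5':'a',
--     '6':'9','7':'8','8':'7','9':'6',
--     'a':'5','b':'4','c':'3','d':'2','e':'1','f':'0'
-- }
--
-- def translate_preserve_5g(s):
--     # single left-to-right scan: copy "_5G" verbatim, translate everything else
--     out = []
--     i = 0
--     n = len(s)
--     while i < n:
--         if s[i:i+3] == "_5G":
--             out.append("_5G")
--             i += 3
--         else:
--             ch = s[i]
--             out.append(translation.get(ch.lower(), ch))
--             i += 1
--     return ''.join(out)
-- ===== Notes on version B (the rewrite author's own statement) =====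
-- stated objective: alternative
-- what changed: Replaced the split-on-delimiter / per-part-translate / re-join pipeline by a single left-to-right index scan that copies the three-character delimiter verbatim when it starts at the current position and otherwise translates one character at a time.
import Mathlib
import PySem

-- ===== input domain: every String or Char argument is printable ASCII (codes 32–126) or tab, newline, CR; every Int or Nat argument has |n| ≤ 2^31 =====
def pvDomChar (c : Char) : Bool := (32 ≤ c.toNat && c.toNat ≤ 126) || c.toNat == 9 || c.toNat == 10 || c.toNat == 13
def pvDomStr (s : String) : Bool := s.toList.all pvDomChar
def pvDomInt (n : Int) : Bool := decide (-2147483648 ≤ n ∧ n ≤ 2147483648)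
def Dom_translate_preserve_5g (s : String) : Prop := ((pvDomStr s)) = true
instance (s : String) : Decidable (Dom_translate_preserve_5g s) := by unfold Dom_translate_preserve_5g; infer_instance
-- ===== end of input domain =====

-- B replaces A's split/translate/join pipeline by a single left-to-right scan that copies the delimiter verbatim (alternative decomposition, same cost).


-- shared module-level constant of both Pythons: the translation dict
def pvTranslation : PySem.Dict String String := PySem.Dict.ofList
  [("0","f"),("1","e"),("2","d"),("3","c"),("4","b"),("5","a"),
   ("6","9"),("7","8"),("8","7"),("9","6"),
   ("a","5"),("b","4"),("c","3"),("d","2"),("e","1"),("f","0")]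

-- translation.get(ch.lower(), ch), as a one-character string's char list
def pvTr (ch : Char) : List Char :=
  (pvTranslation.getD (PySem.Str.lower (String.ofList [ch])) (String.ofList [ch])).toList

-- ===== PORT A =====
def translate_preserve_5g (s : String) : String :=
  let parts := PySem.Chars.splitOn s.toList ['_', '5', 'G']
  let translated := (PySem.List.enumerate parts 0).foldl
    (fun acc p =>
      let t := PySem.Chars.join [] (p.2.map pvTr)
      let acc' := acc ++ [t]
      if p.1 ≠ (parts.length : Int) - 1 then acc' ++ [['_', '5', 'G']] else acc') []
  String.ofList (PySem.Chars.join [] translated)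

-- ===== PORT B =====
-- B's while loop over an index i scans the remaining suffix; structural recursion on the suffix.
def pvScanB : List Char → List Char
  | [] => []
  | c :: rest =>
    if (c :: rest).take 3 = ['_', '5', 'G']
    then '_' :: '5' :: 'G' :: pvScanB (rest.drop 2)
    else pvTr c ++ pvScanB rest
termination_by l => l.length
decreasing_by all_goals simp

def translate_preserve_5g_alt (s : String) : String :=
  String.ofList (pvScanB s.toList)

-- ===== PRECONDITION & SPEC =====
def Spec_translate_preserve_5g (s : String) (out : String) : Prop := out = translate_preserve_5g_alt s
instance (s : String) (out : String) : Decidable (Spec_translate_preserve_5g s out) := by unfold Spec_translate_preserve_5g; infer_instance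

-- ===== CLAIM (what is proved, stated in full; the proofs are below) =====
def Claim_equal_translate_preserve_5g : Prop := ∀ (s : String), Dom_translate_preserve_5g s → Spec_translate_preserve_5g s (translate_preserve_5g s)

-- ===== LEMMAS AND PROOFS =====

-- reference form of Python's leftmost-greedy split on the fixed separator "_5G"
def pvSp : List Char → List (List Char)
  | [] => [[]]
  | c :: rest =>
    if ['_', '5', 'G'].isPrefixOf (c :: rest)
    then [] :: pvSp (rest.drop 2)
    else (pvSp rest).modifyHead (c :: ·)
termination_by l => l.length
decreasing_by all_goals simp

theorem pvSp_ne_nil (l : List Char) : pvSp l ≠ [] := by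
  unfold pvSp
  fun_induction pvSp l with
  | case1 => simp
  | case2 c rest h ih => dsimp only; simp [h]
  | case3 c rest h ih =>
    dsimp only
    rw [if_neg h]
    have ih : pvSp rest ≠ [] := by rw [pvSp.eq_def]; exact ih
    cases hh : pvSp rest with
    | nil => exact absurd hh ih
    | cons q qs => simp


theorem go_spec : ∀ (fuel : Nat) (l cur : List Char) (accs : List (List Char)),
    l.length < fuel →
    PySem.Chars.splitOn.go ['_', '5', 'G'] fuel l cur accs =
      accs.reverse ++ (pvSp l).modifyHead (cur.reverse ++ ·) := by
  intro fuel
  induction fuel with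
  | zero => intro l cur accs h; simp at h
  | succ f ih =>
    intro l cur accs h
    cases l with
    | nil =>
      rw [PySem.Chars.splitOn.go.eq_def]
      simp [pvSp]
    | cons c rest =>
      rw [PySem.Chars.splitOn.go.eq_def]
      dsimp only
      by_cases hp : ['_', '5', 'G'].isPrefixOf (c :: rest) = true
      · rw [if_pos hp]
        have hlen : ('5' :: 'G' :: []) <+: rest := by
          rcases (List.isPrefixOf_iff_prefix.mp hp) with ⟨t, ht⟩
          exact ⟨t, by simpa using congrArg List.tail ht⟩
        have h3 : 2 ≤ rest.length := by
          have := hlen.length_le; simpa using this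
        have hdl : (List.drop 3 (c :: rest)).length < f := by
          simp at h ⊢; omega
        rw [show (['_', '5', 'G'] : List Char).length = 3 from rfl]
        rw [ih _ _ _ hdl]
        conv_rhs => rw [pvSp.eq_def]
        dsimp only
        rw [if_pos hp]
        simp [List.modifyHead]
        cases pvSp (List.drop 2 rest) <;> rfl
      · rw [if_neg hp]
        have hl : rest.length < f := by simp at h; omega
        rw [ih _ _ _ hl]
        conv_rhs => rw [pvSp.eq_def]
        dsimp only
        rw [if_neg hp]
        cases hq : pvSp rest with
        | nil => exact absurd hq (pvSp_ne_nil rest)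
        | cons q qs => simp [List.modifyHead]

theorem splitOn_eq_pvSp (l : List Char) :
    PySem.Chars.splitOn l ['_', '5', 'G'] = pvSp l := by
  unfold PySem.Chars.splitOn
  rw [go_spec (l.length + 1) l [] [] (by omega)]
  cases hq : pvSp l with
  | nil => exact absurd hq (pvSp_ne_nil l)
  | cons q qs => simp [List.modifyHead]

-- interleaved translated parts, separator between consecutive parts
def pvJ : List (List Char) → List Char
  | [] => []
  | [p] => (p.map pvTr).flatten
  | p :: ps => (p.map pvTr).flatten ++ ['_', '5', 'G'] ++ pvJ ps

theorem join_empty (xs : List (List Char)) : PySem.Chars.join [] xs = xs.flatten := by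
  induction xs with
  | nil => simp [PySem.Chars.join_nil]
  | cons x t ih =>
    cases t with
    | nil => simp [PySem.Chars.join_singleton]
    | cons y ts =>
      rw [PySem.Chars.join_cons_cons]
      rw [ih]
      simp

-- A's enumerate-foldl over the parts builds exactly the interleaving pvJ
theorem foldA (n : Int) : ∀ (ps : List (List Char)) (k : Int) (acc : List (List Char)),
    k + ps.length = n →
    PySem.Chars.join [] ((PySem.List.enumerate ps k).foldl
      (fun acc p =>
        let t := PySem.Chars.join [] (p.2.map pvTr)
        let acc' := acc ++ [t]
        if p.1 ≠ n - 1 then acc' ++ [['_', '5', 'G']] else acc') acc) =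
    PySem.Chars.join [] acc ++ pvJ ps := by
  intro ps
  induction ps with
  | nil => intro k acc hk; simp [pvJ]
  | cons p ps' ih =>
    intro k acc hk
    rw [PySem.List.enumerate_cons, List.foldl_cons]
    dsimp only
    cases ps' with
    | nil =>
      have hkn : ¬ (k ≠ n - 1) := by simp at hk ⊢; omega
      rw [if_neg hkn]
      simp [pvJ, join_empty]
    | cons q qs =>
      have hkn : k ≠ n - 1 := by simp at hk; omega
      rw [if_pos hkn]
      rw [ih (k + 1) _ (by simp at hk ⊢; omega)]
      simp [pvJ, join_empty]

theorem take3_eq_of_prefix {c : Char} {rest : List Char}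
    (hp : ['_', '5', 'G'].isPrefixOf (c :: rest) = true) :
    (c :: rest).take 3 = ['_', '5', 'G'] := by
  rcases List.isPrefixOf_iff_prefix.mp hp with ⟨t, ht⟩
  rw [← ht]; simp

theorem pvJ_sp_eq_scanB (l : List Char) : pvJ (pvSp l) = pvScanB l := by
  fun_induction pvSp l with
  | case1 => simp [pvJ, pvScanB]
  | case2 c rest hp ih =>
    rw [pvScanB.eq_def]; dsimp only
    rw [if_pos (take3_eq_of_prefix hp)]
    cases hq : pvSp (List.drop 2 rest) with
    | nil => exact absurd hq (pvSp_ne_nil _)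
    | cons q qs =>
      rw [hq] at ih
      simp [pvJ, ← ih]
  | case3 c rest hp ih =>
    rw [pvScanB.eq_def]; dsimp only
    have hne : ¬ (c :: rest).take 3 = ['_', '5', 'G'] := by
      intro hE
      exact hp (List.isPrefixOf_iff_prefix.mpr (hE ▸ List.take_prefix 3 (c :: rest)))
    rw [if_neg hne]
    cases hq : pvSp rest with
    | nil => exact absurd hq (pvSp_ne_nil _)
    | cons q qs =>
      rw [hq] at ih
      cases qs with
      | nil => simp [pvJ, List.modifyHead, ← ih]
      | cons r rs => simp [pvJ, List.modifyHead, ← ih]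

-- ===== VERDICT (by name: the statement is the Claim_ definition above) =====
theorem translate_preserve_5g_spec : Claim_equal_translate_preserve_5g := by
  intro s _
  unfold Spec_translate_preserve_5g translate_preserve_5g translate_preserve_5g_alt
  dsimp only
  rw [splitOn_eq_pvSp]
  rw [foldA ((pvSp s.toList).length : Int) (pvSp s.toList) 0 [] (by simp)]
  rw [pvJ_sp_eq_scanB]
  simp
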